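-- pv_equiv track=rewrite | github.com/KurtSu/AMD_Austin_TX | main.py | str_squeezing
-- ===== SOURCE A (Python) =====
-- def str_squeezing(s):
--     l = len(s)
--
--     # base cases
--     if l == 0:
--         return []
--     elif l == 1:
--         return [(s[0], )]
--
--     # recursive step
--     else:
--         return [(s[0], s[-1])] + str_squeezing(s[1: -1])
-- ===== SOURCE B (Python) =====
-- def str_squeezing(s):
--     n = len(s)
--     out = [(a, b) for a, b in zip(s, reversed(s))][:n // 2]
--     if n % 2 == 1:
--         out.append((s[n // 2],))
--     return out
-- ===== Notes on version B (the rewrite author's own statement) =====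
-- stated objective: faster
-- what changed: Replaces the recursion that repeatedly slices s[1:-1] (quadratic copying) with a single zip of s against reversed(s) truncated to n//2 pairs plus an optional middle singleton.
import Mathlib
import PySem

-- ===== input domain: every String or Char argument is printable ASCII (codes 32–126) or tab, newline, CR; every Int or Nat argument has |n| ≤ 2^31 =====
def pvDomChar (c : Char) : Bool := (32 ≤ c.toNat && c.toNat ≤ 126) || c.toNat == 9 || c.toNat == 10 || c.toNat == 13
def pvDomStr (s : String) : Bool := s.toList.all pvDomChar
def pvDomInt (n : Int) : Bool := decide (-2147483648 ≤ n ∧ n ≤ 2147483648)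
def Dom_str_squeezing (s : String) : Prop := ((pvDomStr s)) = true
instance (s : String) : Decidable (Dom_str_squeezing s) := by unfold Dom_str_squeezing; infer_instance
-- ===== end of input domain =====

-- B replaces A's recursion over repeated s[1:-1] slices by a single zip of the string with its
-- reverse, truncated to n/2 pairs, plus the middle singleton when n is odd (objective: faster).

-- ===== PORT A =====
-- A's recursion on the string's character list; s[1:-1] is PySem.List.slice cs (some 1) (some (-1)).
def strSqA (cs : List Char) : List (List String) :=
  let l := cs.length
  if l = 0 then []
  else if l = 1 then [[String.mk [cs.headI]]]
  else [[String.mk [cs.headI], String.mk [cs.getLastI]]] ++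
       strSqA (PySem.List.slice cs (some 1) (some (-1)))
termination_by cs.length
decreasing_by
  simp only [PySem.List.length_slice, PySem.List.clampIdx_neg_one]
  omega

def str_squeezing (s : String) : List (List String) := strSqA s.toList

-- ===== PORT B =====
def str_squeezing_alt (s : String) : List (List String) :=
  let cs := s.toList
  let n := cs.length
  let out := ((cs.zip cs.reverse).take (n / 2)).map
      (fun p => [String.mk [p.1], String.mk [p.2]])
  if n % 2 = 1 then out ++ [[String.mk [cs.getD (n / 2) ' ']]] else out

-- ===== PRECONDITION & SPEC =====
def Spec_str_squeezing (s : String) (out : List (List String)) : Prop := out = str_squeezing_alt s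
instance (s : String) (out : List (List String)) : Decidable (Spec_str_squeezing s out) := by unfold Spec_str_squeezing; infer_instance

-- ===== CLAIM (what is proved, stated in full; the proofs are below) =====
def Claim_equal_str_squeezing : Prop := ∀ (s : String), Dom_str_squeezing s → Spec_str_squeezing s (str_squeezing s)

-- ===== LEMMAS AND PROOFS =====

-- B's core on the character list (str_squeezing_alt s = strSqB s.toList definitionally).
def strSqB (cs : List Char) : List (List String) :=
  let n := cs.length
  let out := ((cs.zip cs.reverse).take (n / 2)).map
      (fun p => [String.mk [p.1], String.mk [p.2]])
  if n % 2 = 1 then out ++ [[String.mk [cs.getD (n / 2) ' ']]] else out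

-- B performs one "squeeze" step on a list of length ≥ 2.
lemma strSqB_step (a b : Char) (ds : List Char) :
    strSqB (a :: ds ++ [b]) = [String.mk [a], String.mk [b]] :: strSqB ds := by
  have hlen : (a :: ds ++ [b]).length = ds.length + 2 := by simp
  have hdiv : (ds.length + 2) / 2 = ds.length / 2 + 1 := by omega
  have ht2 : ((ds ++ [b]).zip (ds.reverse ++ [a])).take (ds.length / 2)
      = (ds.zip ds.reverse).take (ds.length / 2) := by
    rw [List.zip_append (by simp), List.take_append_of_le_length (by simp [List.length_zip]; omega)]
  rw [strSqB, strSqB]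
  simp only [hlen]
  have hmod : (ds.length + 2) % 2 = ds.length % 2 := by omega
  rw [hmod, hdiv]
  by_cases hp : ds.length % 2 = 1
  · have hget : (ds ++ [b])[ds.length / 2]? = ds[ds.length / 2]? :=
      List.getElem?_append_left (by omega)
    simp [hp, ht2, hget]
  · simp [hp, ht2]

lemma strSq_core (cs : List Char) : strSqA cs = strSqB cs := by
  induction hn : cs.length using Nat.strong_induction_on generalizing cs with
  | _ n ih =>
  match cs, hn with
  | [], _ => simp [strSqA, strSqB]
  | [c], _ => simp [strSqA, strSqB]
  | c :: d :: t, hn =>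
    obtain ⟨ds, b, hdb⟩ : ∃ ds b, d :: t = ds ++ [b] :=
      ⟨(d :: t).dropLast, (d :: t).getLast (by simp), (List.dropLast_append_getLast (by simp)).symm⟩
    have hslice : PySem.List.slice (c :: d :: t) (some 1) (some (-1)) = ds := by
      rw [show c :: d :: t = c :: ds ++ [b] by simp [hdb]]
      simp [PySem.List.slice]
    have hlast : (c :: d :: t).getLastI = b := by
      rw [show c :: d :: t = c :: ds ++ [b] by simp [hdb]]
      rw [List.getLastI_eq_getLast?_getD,
          show c :: ds ++ [b] = (c :: ds) ++ [b] from rfl, List.getLast?_concat]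
      rfl
    rw [strSqA]
    simp only [List.length_cons, hslice, hlast]
    rw [if_neg (by omega), if_neg (by omega)]
    have hrec : strSqA ds = strSqB ds := by
      apply ih ds.length _ ds rfl
      have : (c :: d :: t).length = ds.length + 2 := by
        rw [show c :: d :: t = c :: ds ++ [b] by simp [hdb]]; simp
      omega
    rw [hrec, show c :: d :: t = c :: ds ++ [b] by simp [hdb], strSqB_step]
    simp

-- ===== VERDICT (by name: the statement is the Claim_ definition above) =====
theorem str_squeezing_spec : Claim_equal_str_squeezing := by
  intro s _
  show str_squeezing s = str_squeezing_alt s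
  simpa [str_squeezing, str_squeezing_alt, strSqB] using strSq_core s.toList
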